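-- pv_equiv track=rewrite | github.com/PhamDinhDuy-2508/Projecy_PY | APP FEM(PY)/Hello.py | tokenfunc
-- ===== SOURCE A (Python) =====
-- def tokenfunc(s) :
--     _char = []
--     _Str =""
--     mylistt = [chr(chnum) for chnum in list(range(ord('a') , ord('z') +1)) ]
--     for i in mylistt :
--         _Str += i
--     _Str= _Str+"-0123456789." +_Str.upper()
--     while(s):
--         if s[0] in _Str :
--            _ch = s[0]
--            s = s[1:]
--            while(s and s[0] in (_Str)  ):
--                _ch += s[0]
--                s= s[1:]
--            _char.append(_ch)
--            if s :
--                _char.append(s[0])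
--                s= s[1:]
--         else :
--             _char.append(s[0])
--             s = s[1:]
--     return _char
-- ===== SOURCE B (Python) =====
-- WORD = "abcdefghijklmnopqrstuvwxyz-0123456789.ABCDEFGHIJKLMNOPQRSTUVWXYZ"
--
-- def tokenfunc(s):
--     out = []
--     run = ""
--     for c in s:
--         if c in WORD:
--             run += c
--         else:
--             if run:
--                 out.append(run)
--                 run = ""
--             out.append(c)
--     if run:
--         out.append(run)
--     return out
-- ===== Notes on version B (the rewrite author's own statement) =====
-- stated objective: faster
-- what changed: Replaced A's destructive slicing loop (s = s[1:] on every char, with a nested inner while consuming each run) by a single linear pass that accumulates the current word run in a variable and flushes it at each delimiter.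
import Mathlib
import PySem

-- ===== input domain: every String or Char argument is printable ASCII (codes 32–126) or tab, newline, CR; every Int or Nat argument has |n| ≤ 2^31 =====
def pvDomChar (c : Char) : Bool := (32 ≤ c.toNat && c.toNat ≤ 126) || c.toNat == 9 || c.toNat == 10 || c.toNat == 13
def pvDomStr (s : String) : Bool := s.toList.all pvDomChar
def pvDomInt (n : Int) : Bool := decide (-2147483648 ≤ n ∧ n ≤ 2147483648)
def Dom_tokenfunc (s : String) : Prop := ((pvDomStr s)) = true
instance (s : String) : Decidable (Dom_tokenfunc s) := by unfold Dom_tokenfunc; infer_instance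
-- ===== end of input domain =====

-- B replaces A's quadratic slicing outer/inner while-loops by a single linear pass that grows a current run and flushes it at each delimiter (objective: faster, measured).

-- ===== PORT A =====
-- _Str: lowercase alphabet built char by char, then "-0123456789." and the uppercase alphabet
def pyStrA : List Char :=
  let mylistt := (PySem.List.pyRange 97 123 1).map (fun n => Char.ofNat n.toNat)
  let base := mylistt.foldl (fun acc c => acc ++ [c]) []   -- _Str += i
  base ++ "-0123456789.".toList ++ PySem.Chars.upper base  -- _Str + "-0123456789." + _Str.upper()

-- inner while: consume leading chars of s that are in _Str, appending them to _ch
def tfInner : List Char → List Char → List Char × List Char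
  | [], acc => (acc, [])
  | c :: rest, acc => if pyStrA.contains c then tfInner rest (acc ++ [c]) else (acc, c :: rest)

theorem tfInner_snd_len (cs : List Char) : ∀ acc, (tfInner cs acc).2.length ≤ cs.length := by
  induction cs with
  | nil => intro acc; simp [tfInner]
  | cons c rest ih =>
      intro acc
      simp only [tfInner]
      split
      · exact le_trans (ih _) (by simp)
      · simp

-- outer while of A
def tfOuter (cs : List Char) : List String :=
  match cs with
  | [] => []
  | c :: rest =>
    if pyStrA.contains c then
      match h2 : tfInner rest [c] with
      | (run, []) => [String.mk run]
      | (run, d :: rest') => String.mk run :: String.mk [d] :: tfOuter rest'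
    else String.mk [c] :: tfOuter rest
termination_by cs.length
decreasing_by
  · have := tfInner_snd_len rest [c]
    rw [h2] at this
    simp at this
    simp
    omega
  · simp

def tokenfunc (s : String) : List String := tfOuter s.toList

-- ===== PORT B =====
def wordChars : List Char := "abcdefghijklmnopqrstuvwxyz-0123456789.ABCDEFGHIJKLMNOPQRSTUVWXYZ".toList

-- single pass: grow the current run; on a delimiter flush the run (if any) then emit the delimiter
def tfLoop : List Char → List String → List Char → List String
  | [], out, run => if run ≠ [] then out ++ [String.mk run] else out
  | c :: cs, out, run =>
    if wordChars.contains c then tfLoop cs out (run ++ [c])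
    else if run ≠ [] then tfLoop cs (out ++ [String.mk run, String.mk [c]]) []
    else tfLoop cs (out ++ [String.mk [c]]) []

def tokenfunc_alt (s : String) : List String := tfLoop s.toList [] []  -- run ported as List Char; "" = []

-- ===== PRECONDITION & SPEC =====
def Spec_tokenfunc (s : String) (out : List String) : Prop := out = tokenfunc_alt s
instance (s : String) (out : List String) : Decidable (Spec_tokenfunc s out) := by unfold Spec_tokenfunc; infer_instance

-- ===== CLAIM (what is proved, stated in full; the proofs are below) =====
def Claim_equal_tokenfunc : Prop := ∀ (s : String), Dom_tokenfunc s → Spec_tokenfunc s (tokenfunc s)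

-- ===== LEMMAS AND PROOFS =====

theorem strA_eq_word : pyStrA = wordChars := by decide

theorem tfLoop_out (cs : List Char) : ∀ out run, tfLoop cs out run = out ++ tfLoop cs [] run := by
  induction cs with
  | nil =>
      intro out run; simp only [tfLoop]; split <;> simp
  | cons c rest ih =>
      intro out run
      simp only [tfLoop]
      split
      · rw [ih out, ih []]
      · split
        · rw [ih (out ++ _), ih ([] ++ _)]; simp
        · rw [ih (out ++ _), ih ([] ++ _)]; simp

theorem tfInner_spec (cs : List Char) : ∀ acc,
    tfInner cs acc = (acc ++ cs.takeWhile pyStrA.contains, cs.dropWhile pyStrA.contains) := by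
  induction cs with
  | nil => intro acc; simp [tfInner]
  | cons c rest ih =>
      intro acc
      by_cases h : c ∈ pyStrA
      · simp [tfInner, h, ih]
      · simp [tfInner, h]

theorem tfLoop_run (cs : List Char) : ∀ r, r ≠ [] →
    tfLoop cs [] r =
      match cs.dropWhile pyStrA.contains with
      | [] => [String.mk (r ++ cs.takeWhile pyStrA.contains)]
      | d :: ds => String.mk (r ++ cs.takeWhile pyStrA.contains) :: String.mk [d] :: tfLoop ds [] [] := by
  induction cs with
  | nil => intro r hr; simp [tfLoop, hr]
  | cons c rest ih =>
      intro r hr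
      by_cases h : c ∈ pyStrA
      · rw [show tfLoop (c :: rest) [] r = tfLoop rest [] (r ++ [c]) by
          simp [tfLoop, ← strA_eq_word, h]]
        rw [ih (r ++ [c]) (by simp)]
        simp [h]
      · rw [show tfLoop (c :: rest) [] r = tfLoop rest [String.mk r, String.mk [c]] [] by
          simp [tfLoop, ← strA_eq_word, h, hr]]
        rw [tfLoop_out rest]
        simp [h]

theorem outer_eq_loop (cs : List Char) : tfOuter cs = tfLoop cs [] [] := by
  induction cs using tfOuter.induct with
  | case1 => simp [tfOuter, tfLoop]
  | case2 c rest h run h2 =>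
      have hs := tfInner_spec rest [c]
      rw [h2] at hs
      have hd : rest.dropWhile pyStrA.contains = [] := by
        have := congrArg Prod.snd hs; simpa using this.symm
      have ht : run = [c] ++ rest.takeWhile pyStrA.contains := by
        have := congrArg Prod.fst hs; simpa using this
      have hc : c ∈ pyStrA := by simpa using h
      rw [tfOuter.eq_def]
      simp only [h, if_true]
      split
      · rename_i run1 heq
        rw [h2] at heq
        injection heq with hA hB
        subst hA
        rw [show tfLoop (c :: rest) [] [] = tfLoop rest [] [c] by
          simp [tfLoop, ← strA_eq_word, hc]]
        rw [tfLoop_run rest [c] (by simp)]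
        simp [hd, ht]
      · rename_i run1 d rest' heq
        rw [h2] at heq
        simp at heq
  | case3 c rest h run d rest' h2 ih =>
      have hs := tfInner_spec rest [c]
      rw [h2] at hs
      have hd : rest.dropWhile pyStrA.contains = d :: rest' := by
        have := congrArg Prod.snd hs; simpa using this.symm
      have ht : run = [c] ++ rest.takeWhile pyStrA.contains := by
        have := congrArg Prod.fst hs; simpa using this
      have hc : c ∈ pyStrA := by simpa using h
      rw [tfOuter.eq_def]
      simp only [h, if_true]
      split
      · rename_i run1 heq
        rw [h2] at heq
        simp at heq
      · rename_i run1 d1 rest1 heq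
        rw [h2] at heq
        injection heq with hA hB
        injection hB with hB1 hB2
        subst hA; subst hB1; subst hB2
        rw [show tfLoop (c :: rest) [] [] = tfLoop rest [] [c] by
          simp [tfLoop, ← strA_eq_word, hc]]
        rw [tfLoop_run rest [c] (by simp)]
        simp [hd, ht, ih]
  | case4 c rest h ih =>
      have hc : c ∉ pyStrA := by simpa using h
      rw [tfOuter.eq_def]
      simp only [h]
      rw [show tfLoop (c :: rest) [] [] = tfLoop rest [String.mk [c]] [] by
        simp [tfLoop, ← strA_eq_word, hc]]
      rw [tfLoop_out rest]
      simp [ih]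

-- ===== VERDICT (by name: the statement is the Claim_ definition above) =====
theorem tokenfunc_spec : Claim_equal_tokenfunc := by
  intro s _
  show tfOuter s.toList = tfLoop s.toList [] []
  exact outer_eq_loop s.toList
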